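-- pv_equiv track=rewrite | github.com/jordans1882/pyFEA | pyfea/fea/factor_architectures.py | linear_factorizer
-- ===== SOURCE A (Python) =====
-- def linear_factorizer(fact_size, overlap, dim):
--     if fact_size is None or fact_size <= overlap or fact_size <= 0:
--         return None
--     smallest = 0
--     largest = fact_size
--     factors = []
--     while largest <= dim:
--         factors.append([x for x in range(smallest, largest)])
--         smallest = largest - overlap
--         largest += fact_size - overlap
--     if smallest < dim:
--         factors.append([x for x in range(smallest, dim)])
--     return factors
-- ===== SOURCE B (Python) =====
-- def linear_factorizer(fact_size, overlap, dim):
--     if fact_size is None or fact_size <= overlap or fact_size <= 0: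
--         return None
--     stride = fact_size - overlap
--     # closed-form count of full windows
--     n = (dim - fact_size) // stride + 1 if dim >= fact_size else 0
--     tail_start = n * stride
--     # build the output BACK-TO-FRONT: tail chunk first, then windows from
--     # the last start down to 0, and reverse once at the end
--     rev = [list(range(tail_start, dim))] if tail_start < dim else []
--     for i in range(n - 1, -1, -1):
--         rev.append(list(range(i * stride, i * stride + fact_size)))
--     rev.reverse()
--     return rev
-- ===== Notes on version B (the rewrite author's own statement) =====
-- stated objective: alternative
-- what changed: Instead of A's forward while loop mutating (smallest, largest) and deriving the tail from leftover loop state, B computes the window count by closed-form floor division, places the tail chunk first, builds the windows back-to-front from the last start down to 0, and reverses the list once at the end.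
import Mathlib
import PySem

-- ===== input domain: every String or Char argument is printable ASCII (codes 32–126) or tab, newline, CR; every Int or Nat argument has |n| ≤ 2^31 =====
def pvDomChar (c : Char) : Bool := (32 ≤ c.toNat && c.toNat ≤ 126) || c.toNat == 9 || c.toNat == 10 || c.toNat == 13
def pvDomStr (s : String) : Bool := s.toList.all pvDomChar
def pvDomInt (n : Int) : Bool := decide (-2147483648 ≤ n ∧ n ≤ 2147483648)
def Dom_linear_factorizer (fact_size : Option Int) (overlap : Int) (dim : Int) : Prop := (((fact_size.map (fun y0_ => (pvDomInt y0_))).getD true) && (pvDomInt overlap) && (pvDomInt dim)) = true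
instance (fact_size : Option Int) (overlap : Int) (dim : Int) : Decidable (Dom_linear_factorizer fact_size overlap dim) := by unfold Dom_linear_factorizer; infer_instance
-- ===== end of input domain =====

-- B replaces A's forward while loop over (smallest, largest) state by a closed-form window
-- count and a back-to-front construction (tail first, windows from the last start down to 0,
-- one final reverse); different decomposition, same cost.

-- ===== PORT A =====
-- A's while loop: state (smallest, largest, factors); returns the final smallest and factors.
def lfLoop (fs overlap dim : Int) (h : 0 < fs - overlap) (smallest largest : Int)
    (acc : List (List Int)) : Int × List (List Int) :=
  if largest ≤ dim then
    lfLoop fs overlap dim h (largest - overlap) (largest + (fs - overlap))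
      (acc ++ [PySem.List.pyRange smallest largest 1])
  else (smallest, acc)
termination_by (dim + 1 - largest).toNat
decreasing_by omega

def linear_factorizer (fact_size : Option Int) (overlap : Int) (dim : Int) : Option (List (List Int)) :=
  match fact_size with
  | none => none
  | some fs =>
    if h : fs ≤ overlap ∨ fs ≤ 0 then none
    else
      let r := lfLoop fs overlap dim (by omega) 0 fs []
      if r.1 < dim then some (r.2 ++ [PySem.List.pyRange r.1 dim 1]) else some r.2

-- ===== PORT B =====
def linear_factorizer_alt (fact_size : Option Int) (overlap : Int) (dim : Int) : Option (List (List Int)) :=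
  match fact_size with
  | none => none
  | some fs =>
    if fs ≤ overlap ∨ fs ≤ 0 then none
    else
      let stride := fs - overlap
      let n : Int := if fs ≤ dim then PySem.Int.floordiv (dim - fs) stride + 1 else 0
      let tail_start := n * stride
      let rev0 : List (List Int) :=
        if tail_start < dim then [PySem.List.pyRange tail_start dim 1] else []
      let rev := (PySem.List.pyRange (n - 1) (-1) (-1)).foldl
        (fun acc i => acc ++ [PySem.List.pyRange (i * stride) (i * stride + fs) 1]) rev0
      some rev.reverse

-- ===== PRECONDITION & SPEC =====
def Spec_linear_factorizer (fact_size : Option Int) (overlap : Int) (dim : Int) (out : Option (List (List Int))) : Prop := out = linear_factorizer_alt fact_size overlap dim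
instance (fact_size : Option Int) (overlap : Int) (dim : Int) (out : Option (List (List Int))) : Decidable (Spec_linear_factorizer fact_size overlap dim out) := by unfold Spec_linear_factorizer; infer_instance

-- ===== CLAIM (what is proved, stated in full; the proofs are below) =====
def Claim_equal_linear_factorizer : Prop := ∀ (fact_size : Option Int) (overlap : Int) (dim : Int), Dom_linear_factorizer fact_size overlap dim → Spec_linear_factorizer fact_size overlap dim (linear_factorizer fact_size overlap dim)

-- ===== LEMMAS AND PROOFS =====

theorem pyRange_pos_nil (a b st : Int) (hst : 0 < st) (hab : b ≤ a) :
    PySem.List.pyRange a b st = [] := by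
  rw [PySem.List.pyRange_of_pos a b hst, if_neg (by omega)]
  simp

theorem pyRange_pos_cons (a b st : Int) (hst : 0 < st) (hab : a < b) :
    PySem.List.pyRange a b st = a :: PySem.List.pyRange (a + st) b st := by
  rw [PySem.List.pyRange_of_pos a b hst, PySem.List.pyRange_of_pos (a + st) b hst, if_pos hab]
  have hdiv : (b - a + st - 1) / st = (b - a - 1) / st + 1 := by
    have h1 : b - a + st - 1 = b - a - 1 + 1 * st := by ring
    rw [h1, Int.add_mul_ediv_right _ _ (by omega : st ≠ 0)]
  have hnn : 0 ≤ (b - a - 1) / st := Int.ediv_nonneg (by omega) (by omega)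
  have hinner : (if a + st < b then ((b - (a + st) + st - 1) / st).toNat else 0)
      = ((b - a - 1) / st).toNat := by
    split
    · congr 1; ring_nf
    · have h0 : (b - a - 1) / st = 0 := Int.ediv_eq_zero_of_lt (by omega) (by omega)
      simp [h0]
  have hcount : ((b - a + st - 1) / st).toNat
      = (if a + st < b then ((b - (a + st) + st - 1) / st).toNat else 0) + 1 := by
    rw [hinner]; omega
  rw [hcount, List.range_succ_eq_map, List.map_cons, List.map_map]
  congr 1
  · simp
  · apply List.map_congr_left
    intro k _
    simp only [Function.comp_apply]
    push_cast
    ring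

theorem lfLoop_eq (fs ov dim : Int) (h : 0 < fs - ov) (s : Int) (acc : List (List Int)) :
    lfLoop fs ov dim h s (s + fs) acc =
      ((match (PySem.List.pyRange s (dim - fs + 1) (fs - ov)).getLast? with
         | some l => l + (fs - ov)
         | none => s),
       acc ++ (PySem.List.pyRange s (dim - fs + 1) (fs - ov)).map
         (fun t => PySem.List.pyRange t (t + fs) 1)) := by
  by_cases hc : s + fs ≤ dim
  · have hlt : s < dim - fs + 1 := by omega
    rw [pyRange_pos_cons s (dim - fs + 1) (fs - ov) h hlt]
    rw [lfLoop]
    rw [if_pos hc]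
    have harg1 : s + fs - ov = s + (fs - ov) := by ring
    have harg2 : s + fs + (fs - ov) = (s + (fs - ov)) + fs := by ring
    rw [harg1, harg2, lfLoop_eq fs ov dim h (s + (fs - ov)) (acc ++ [PySem.List.pyRange s (s + fs) 1])]
    cases htail : PySem.List.pyRange (s + (fs - ov)) (dim - fs + 1) (fs - ov) with
    | nil => simp
    | cons x xs => simp [List.getLast?_cons]
  · rw [lfLoop, if_neg hc, pyRange_pos_nil s (dim - fs + 1) (fs - ov) h (by omega)]
    simp
termination_by (dim + 1 - (s + fs)).toNat
decreasing_by omega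

-- starts of A's windows, as a strided range, equal the closed-form count many multiples of the stride
theorem starts_eq (fs ov dim : Int) (h : 0 < fs - ov) :
    PySem.List.pyRange 0 (dim - fs + 1) (fs - ov) =
      (PySem.List.pyRange 0 (if fs ≤ dim then (dim - fs) / (fs - ov) + 1 else 0) 1).map
        (fun k => k * (fs - ov)) := by
  by_cases hd : fs ≤ dim
  · rw [if_pos hd]
    rw [PySem.List.pyRange_of_pos 0 (dim - fs + 1) h, if_pos (by omega)]
    rw [PySem.List.pyRange_one]
    have hcnt : (dim - fs + 1 - 0 + (fs - ov) - 1) / (fs - ov) = (dim - fs) / (fs - ov) + 1 := by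
      have h1 : dim - fs + 1 - 0 + (fs - ov) - 1 = dim - fs + 1 * (fs - ov) := by ring
      rw [h1, Int.add_mul_ediv_right _ _ (by omega : fs - ov ≠ 0)]
    have hnn : 0 ≤ (dim - fs) / (fs - ov) := Int.ediv_nonneg (by omega) (by omega)
    rw [hcnt, List.map_map]
    have : ((dim - fs) / (fs - ov) + 1 - 0).toNat = ((dim - fs) / (fs - ov) + 1).toNat := by omega
    rw [this]
    apply List.map_congr_left
    intro k _
    simp only [Function.comp_apply]
    ring
  · rw [if_neg hd, pyRange_pos_nil 0 (dim - fs + 1) (fs - ov) h (by omega)]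
    rw [PySem.List.pyRange_one]
    simp

-- ===== VERDICT (by name: the statement is the Claim_ definition above) =====
theorem linear_factorizer_spec : Claim_equal_linear_factorizer := by
  intro fact_size overlap dim _
  unfold Spec_linear_factorizer linear_factorizer linear_factorizer_alt
  cases fact_size with
  | none => rfl
  | some fs =>
    by_cases hg : fs ≤ overlap ∨ fs ≤ 0
    · simp [hg]
    · simp only [hg, dif_neg, if_neg, not_false_iff]
      have h : 0 < fs - overlap := by omega
      have hA := lfLoop_eq fs overlap dim h 0 []
      rw [zero_add] at hA
      rw [hA]
      set n : Int := if fs ≤ dim then (dim - fs) / (fs - overlap) + 1 else 0 with hn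
      have hfd : (if fs ≤ dim then PySem.Int.floordiv (dim - fs) (fs - overlap) + 1 else 0) = n := by
        rw [hn]
        by_cases hd : fs ≤ dim
    <;> simp [hd, PySem.Int.floordiv_eq_ediv_of_pos h]
      have hnn : 0 ≤ n := by
        rw [hn]; split
        · have := Int.ediv_nonneg (by omega : (0:Int) ≤ dim - fs) (by omega : (0:Int) ≤ fs - overlap)
          omega
        · omega
      have hst := starts_eq fs overlap dim h
      rw [← hn] at hst
      -- B's countdown list is the reverse of the starts index list
      have hrev : PySem.List.pyRange (n - 1) (-1) (-1) = (PySem.List.pyRange 0 n 1).reverse := by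
        rw [PySem.List.pyRange_neg_one_eq_reverse]
        norm_num
      -- fold with append = initial ++ map
      have hfold : ∀ (l : List Int) (init : List (List Int)) (f : Int → List Int),
          l.foldl (fun acc i => acc ++ [f i]) init = init ++ l.map f := by
        intro l
        induction l with
        | nil => simp
        | cons x xs ih => intro init f; simp [ih]
      have hlast : (match ((PySem.List.pyRange 0 n 1).map (fun k => k * (fs - overlap))).getLast? with
          | some l => l + (fs - overlap) | none => (0:Int)) = n * (fs - overlap) := by
        rcases lt_or_eq_of_le hnn with hpos | hz
        · have hsplit : PySem.List.pyRange 0 n 1 = PySem.List.pyRange 0 (n-1) 1 ++ [n-1] := by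
            have h1 := PySem.List.pyRange_one_succ_right (a := 0) (b := n - 1) (by omega)
            rw [show n - 1 + 1 = n by ring] at h1
            exact h1
          rw [hsplit]
          simp [List.getLast?_append]
          ring
        · rw [← hz]
          simp [PySem.List.pyRange_one_eq_nil (by omega : (0:Int) ≤ 0)]
      rw [hst, hlast, hfd, hrev, hfold]
      simp only [List.reverse_append, List.map_reverse, List.reverse_reverse, List.map_map]
      split_ifs with hc
      · simp
      · simp
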